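-- pv_equiv track=rewrite | github.com/xliu40/stat390-team3-presentation4 | base_code/data_utils.py | build_case_dict
-- ===== SOURCE A (Python) =====
-- from collections import defaultdict, Counter
-- from typing import Dict, List, Tuple, Any, Optional
--
-- def build_case_dict(
--     slice_list: List[Tuple],
--     patches: Dict,
--     slice_to_class: Dict
-- ) -> Tuple[Dict, Dict]:
--     """
--     Build case dictionary and label map from slice list
--     Returns: case_dict, label_map
--
--     Determinism guarantees:
--     - slice_list is processed in sorted order by (case_id, slice_id)
--     - within each (case_id, stain, slice_id), patch paths are sorted
--     - within each (case_id, stain), slices are sorted by slice_id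
--     """
--     # Temporary structure keeps slice_id so we can sort slices deterministically
--     tmp_case_dict = defaultdict(lambda: defaultdict(list))
--     label_map = {}
--
--     # IMPORTANT: deterministic ordering of slices
--     slice_list_sorted = sorted(slice_list, key=lambda x: (int(x[0]), str(x[1])))
--
--     for case_id, slice_id in slice_list_sorted:
--         if (case_id, slice_id) not in patches:
--             continue
--
--         patch_paths = patches[(case_id, slice_id)]
--
--         # Group patches by stain (extract stain from filenames)
--         stain_groups = defaultdict(list)
--         for patch_path in patch_paths:
--             stain = extract_stain_from_filename(patch_path)  # <-- data_utils.py
--             if stain: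
--                 stain_groups[stain].append(patch_path)
--
--         # Store (slice_id, sorted_patch_list) so slices can be sorted later
--         for stain in sorted(stain_groups.keys()):
--             stain_patches = sorted(stain_groups[stain])
--             tmp_case_dict[case_id][stain].append((str(slice_id), stain_patches))
--
--         # Set label for this case (stable: label is per-case anyway)
--         if (case_id, slice_id) in slice_to_class:
--             label_map[case_id] = slice_to_class[(case_id, slice_id)]
--
--     # Convert tmp_case_dict -> expected structure: case_dict[case_id][stain] = List[List[str]]
--     case_dict = {}
--     for case_id, stain_map in tmp_case_dict.items():
--         case_dict[case_id] = {}
--         for stain, slice_entries in stain_map.items():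
--             # Deterministic ordering of slices within each stain
--             slice_entries_sorted = sorted(slice_entries, key=lambda t: t[0])  # sort by slice_id
--             case_dict[case_id][stain] = [patch_list for (_, patch_list) in slice_entries_sorted]
--
--     return case_dict, label_map
--
-- def extract_stain_from_filename(filename: str) -> Optional[str]:
--     """Extract stain type from patch filename"""
--     filename_lower = filename.lower()
--     if "h&e" in filename_lower or "_he_" in filename_lower:
--         return "h&e"
--     elif "melan" in filename_lower:
--         return "melan"
--     elif "sox10" in filename_lower:
--         return "sox10"
--     return None
-- ===== SOURCE B (Python) =====
-- from typing import Dict, List, Tuple, Optional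
--
-- STAINS = ("h&e", "melan", "sox10")
--
-- def extract_stain_from_filename(filename: str) -> Optional[str]:
--     """Extract stain type from patch filename"""
--     filename_lower = filename.lower()
--     if "h&e" in filename_lower or "_he_" in filename_lower:
--         return "h&e"
--     elif "melan" in filename_lower:
--         return "melan"
--     elif "sox10" in filename_lower:
--         return "sox10"
--     return None
--
-- def build_case_dict(
--     slice_list: List[Tuple],
--     patches: Dict,
--     slice_to_class: Dict
-- ) -> Tuple[Dict, Dict]:
--     """Direct build: no stain-grouping dict, no temporary (slice_id, patches)
--     tuples, no conversion/re-sort pass.  There are only three possible stains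
--     and their sorted order is fixed, so each slice is handled by filtering its
--     paths per stain in that fixed order; the label map is built by its own
--     comprehension."""
--     order = sorted(slice_list, key=lambda x: (int(x[0]), str(x[1])))
--
--     case_dict = {}
--     for case_id, slice_id in order:
--         if (case_id, slice_id) not in patches:
--             continue
--         paths = patches[(case_id, slice_id)]
--         for stain in STAINS:
--             group = sorted(p for p in paths
--                            if extract_stain_from_filename(p) == stain)
--             if group:
--                 case_dict.setdefault(case_id, {}).setdefault(stain, []).append(group)
--
--     label_map = {c: slice_to_class[(c, s)] for c, s in order
--                  if (c, s) in patches and (c, s) in slice_to_class}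
--     return case_dict, label_map
-- ===== Notes on version B (the rewrite author's own statement) =====
-- stated objective: simpler
-- what changed: B drops both of A's dictionaries-of-intermediate-state: it exploits that the only three stain names already sort in the fixed order (h&e, melan, sox10), so each slice is handled by filtering its paths per stain in that fixed order and appending the sorted group straight into the nested result dict (no stain-grouping defaultdict, no key sort, no temporary (slice_id, patches) tuples, no second conversion/re-sort pass), and the label map is built by an independent dict comprehension.
import Mathlib
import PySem

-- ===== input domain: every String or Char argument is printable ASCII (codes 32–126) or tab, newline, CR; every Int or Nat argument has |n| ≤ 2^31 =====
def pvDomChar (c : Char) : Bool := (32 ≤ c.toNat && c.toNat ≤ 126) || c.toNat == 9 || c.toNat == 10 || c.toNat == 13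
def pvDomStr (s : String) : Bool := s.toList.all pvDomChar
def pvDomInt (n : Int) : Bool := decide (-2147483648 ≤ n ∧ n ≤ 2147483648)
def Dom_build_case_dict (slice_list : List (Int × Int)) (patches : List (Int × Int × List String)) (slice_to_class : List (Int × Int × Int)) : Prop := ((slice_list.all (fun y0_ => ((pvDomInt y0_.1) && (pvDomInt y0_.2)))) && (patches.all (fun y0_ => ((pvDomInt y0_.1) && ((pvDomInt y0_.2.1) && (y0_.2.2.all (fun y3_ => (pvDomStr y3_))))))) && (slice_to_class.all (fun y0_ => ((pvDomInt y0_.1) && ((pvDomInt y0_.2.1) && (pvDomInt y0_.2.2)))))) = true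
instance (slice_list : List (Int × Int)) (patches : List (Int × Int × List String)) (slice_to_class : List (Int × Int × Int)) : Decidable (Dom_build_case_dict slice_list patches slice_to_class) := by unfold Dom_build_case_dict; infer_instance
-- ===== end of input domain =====

-- B builds the nested case dict directly (the three stain names already sort in the fixed
-- order h&e, melan, sox10, so each slice is handled by per-stain filtering in that fixed
-- order: no grouping dict, no temporary tuples, no conversion/re-sort pass; the label map
-- is built by its own independent pass); objective: simpler.

-- ===== PORT A =====

-- shared module helper extract_stain_from_filename (identical in Source A and Source B)
def extractStain (filename : String) : Option String :=
  let fl := PySem.Str.lower filename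
  if PySem.Str.isIn "h&e" fl || PySem.Str.isIn "_he_" fl then some "h&e"
  else if PySem.Str.isIn "melan" fl then some "melan"
  else if PySem.Str.isIn "sox10" fl then some "sox10"
  else none

-- '(a, b) in d' / 'd[(a, b)]' on the tuple-keyed dict-as-association-list: first match
def pyLookup2 {τ : Type} (d : List (Int × Int × τ)) (a b : Int) : Option τ :=
  (d.find? (fun t => t.1 == a && t.2.1 == b)).map (·.2.2)

-- A's 'group patches by stain' defaultdict loop
def stainGroups (pp : List String) : PySem.Dict String (List String) :=
  pp.foldl (fun g p =>
    match extractStain p with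
    | some s => g.modify s [] (· ++ [p])
    | none => g) PySem.Dict.empty

-- body of A's main loop
def aStep (patches : List (Int × Int × List String)) (slice_to_class : List (Int × Int × Int))
    (st : PySem.Dict Int (PySem.Dict String (List (String × List String))) × PySem.Dict Int Int)
    (x : Int × Int) :
    PySem.Dict Int (PySem.Dict String (List (String × List String))) × PySem.Dict Int Int :=
  match pyLookup2 patches x.1 x.2 with
  | none => st
  | some patch_paths =>
    let sg := stainGroups patch_paths
    let tmp := (PySem.List.sorted sg.keys (fun k => k)).foldl
      (fun t stain => t.modify x.1 PySem.Dict.empty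
        (fun inner => inner.modify stain []
          (· ++ [(PySem.Int.toStr x.2, PySem.List.sorted (sg.getD stain []) (fun y => y))]))) st.1
    let lbl := match pyLookup2 slice_to_class x.1 x.2 with
      | none => st.2
      | some c => st.2.insert x.1 c
    (tmp, lbl)

def build_case_dict (slice_list : List (Int × Int)) (patches : List (Int × Int × List String)) (slice_to_class : List (Int × Int × Int)) : (List (Int × List (String × List (List String)))) × (List (Int × Int)) :=
  let slice_list_sorted := PySem.List.sorted2 slice_list (fun x => x.1) (fun x => PySem.Int.toStr x.2)
  let st := slice_list_sorted.foldl (aStep patches slice_to_class) (PySem.Dict.empty, PySem.Dict.empty)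
  let case_dict := st.1.items.map (fun ci =>
    (ci.1, ci.2.items.map (fun se =>
      (se.1, (PySem.List.sorted se.2 (fun t => t.1)).map (·.2)))))
  (case_dict, st.2.items)

-- ===== PORT B =====

-- B's fixed stain order: the module-level STAINS tuple of Source B
def STAINS : List String := ["h&e", "melan", "sox10"]

-- B's per-slice body: filter the paths per stain in fixed order, append the sorted group
def cdStep (patches : List (Int × Int × List String))
    (cd : PySem.Dict Int (PySem.Dict String (List (List String)))) (x : Int × Int) :
    PySem.Dict Int (PySem.Dict String (List (List String))) :=
  match pyLookup2 patches x.1 x.2 with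
  | none => cd
  | some paths =>
    STAINS.foldl (fun cd stain =>
      let group := PySem.List.sorted (paths.filter (fun p => extractStain p == some stain)) (fun y => y)
      if group.isEmpty then cd
      else cd.modify x.1 PySem.Dict.empty (fun inner => inner.modify stain [] (· ++ [group]))) cd

-- B's label-map comprehension body
def lmStep (patches : List (Int × Int × List String)) (slice_to_class : List (Int × Int × Int))
    (lm : PySem.Dict Int Int) (x : Int × Int) : PySem.Dict Int Int :=
  match pyLookup2 patches x.1 x.2 with
  | none => lm
  | some _ =>
    match pyLookup2 slice_to_class x.1 x.2 with
    | none => lm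
    | some c => lm.insert x.1 c

def build_case_dict_alt (slice_list : List (Int × Int)) (patches : List (Int × Int × List String)) (slice_to_class : List (Int × Int × Int)) : (List (Int × List (String × List (List String)))) × (List (Int × Int)) :=
  let order := PySem.List.sorted2 slice_list (fun x => x.1) (fun x => PySem.Int.toStr x.2)
  let cd := order.foldl (cdStep patches) PySem.Dict.empty
  let lm := order.foldl (lmStep patches slice_to_class) PySem.Dict.empty
  (cd.items.map (fun ci => (ci.1, ci.2.items)), lm.items)

-- ===== PRECONDITION & SPEC =====
def Spec_build_case_dict (slice_list : List (Int × Int)) (patches : List (Int × Int × List String)) (slice_to_class : List (Int × Int × Int)) (out : (List (Int × List (String × List (List String)))) × (List (Int × Int))) : Prop := out = build_case_dict_alt slice_list patches slice_to_class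
instance (slice_list : List (Int × Int)) (patches : List (Int × Int × List String)) (slice_to_class : List (Int × Int × Int)) (out : (List (Int × List (String × List (List String)))) × (List (Int × Int))) : Decidable (Spec_build_case_dict slice_list patches slice_to_class out) := by unfold Spec_build_case_dict; infer_instance

-- ===== CLAIM (what is proved, stated in full; the proofs are below) =====
def Claim_equal_build_case_dict : Prop := ∀ (slice_list : List (Int × Int)) (patches : List (Int × Int × List String)) (slice_to_class : List (Int × Int × Int)), Dom_build_case_dict slice_list patches slice_to_class → Spec_build_case_dict slice_list patches slice_to_class (build_case_dict slice_list patches slice_to_class)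

-- ===== LEMMAS AND PROOFS =====

-- A's tmp-dict component of aStep, isolated (the label half never feeds into it)
def aTmpStep (patches : List (Int × Int × List String))
    (tmp : PySem.Dict Int (PySem.Dict String (List (String × List String)))) (x : Int × Int) :
    PySem.Dict Int (PySem.Dict String (List (String × List String))) :=
  match pyLookup2 patches x.1 x.2 with
  | none => tmp
  | some patch_paths =>
    let sg := stainGroups patch_paths
    (PySem.List.sorted sg.keys (fun k => k)).foldl
      (fun t stain => t.modify x.1 PySem.Dict.empty
        (fun inner => inner.modify stain []
          (· ++ [(PySem.Int.toStr x.2, PySem.List.sorted (sg.getD stain []) (fun y => y))]))) tmp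

lemma aStep_fst (patches : List (Int × Int × List String)) (slice_to_class : List (Int × Int × Int))
    (st : PySem.Dict Int (PySem.Dict String (List (String × List String))) × PySem.Dict Int Int)
    (x : Int × Int) : (aStep patches slice_to_class st x).1 = aTmpStep patches st.1 x := by
  simp only [aStep, aTmpStep]
  cases pyLookup2 patches x.1 x.2 <;> rfl

lemma aStep_snd (patches : List (Int × Int × List String)) (slice_to_class : List (Int × Int × Int))
    (st : PySem.Dict Int (PySem.Dict String (List (String × List String))) × PySem.Dict Int Int)
    (x : Int × Int) : (aStep patches slice_to_class st x).2 = lmStep patches slice_to_class st.2 x := by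
  simp only [aStep, lmStep]
  cases pyLookup2 patches x.1 x.2 <;> rfl

lemma foldl_aStep_fst (patches : List (Int × Int × List String)) (slice_to_class : List (Int × Int × Int))
    (L : List (Int × Int))
    (st : PySem.Dict Int (PySem.Dict String (List (String × List String))) × PySem.Dict Int Int) :
    (L.foldl (aStep patches slice_to_class) st).1 = L.foldl (aTmpStep patches) st.1 := by
  induction L generalizing st with
  | nil => rfl
  | cons x L ih =>
    simp only [List.foldl_cons]
    rw [ih, aStep_fst]

lemma foldl_aStep_snd (patches : List (Int × Int × List String)) (slice_to_class : List (Int × Int × Int))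
    (L : List (Int × Int))
    (st : PySem.Dict Int (PySem.Dict String (List (String × List String))) × PySem.Dict Int Int) :
    (L.foldl (aStep patches slice_to_class) st).2 = L.foldl (lmStep patches slice_to_class) st.2 := by
  induction L generalizing st with
  | nil => rfl
  | cons x L ih =>
    simp only [List.foldl_cons]
    rw [ih, aStep_snd]

-- entries stored for case c, stain s in A's temporary structure / B's case dict
def entriesA (A : PySem.Dict Int (PySem.Dict String (List (String × List String)))) (c : Int) (s : String) : List (String × List String) :=
  (A.getD c PySem.Dict.empty).getD s []

def entriesB (B : PySem.Dict Int (PySem.Dict String (List (List String)))) (c : Int) (s : String) : List (List String) :=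
  (B.getD c PySem.Dict.empty).getD s []

-- simulation relation between A's temporary structure and B's case_dict
def SimRel (A : PySem.Dict Int (PySem.Dict String (List (String × List String))))
    (B : PySem.Dict Int (PySem.Dict String (List (List String)))) : Prop :=
  A.keys.Nodup ∧ B.keys = A.keys
  ∧ (∀ c, (A.getD c PySem.Dict.empty).keys.Nodup
        ∧ (B.getD c PySem.Dict.empty).keys = (A.getD c PySem.Dict.empty).keys)
  ∧ (∀ c s, entriesB B c s = (entriesA A c s).map (·.2))

-- the stored slice-id keys are nondecreasing and bounded by every slice still to be processed
def Bounded (A : PySem.Dict Int (PySem.Dict String (List (String × List String)))) (L : List (Int × Int)) : Prop :=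
  ∀ c s, (entriesA A c s).Pairwise (fun u v => u.1 ≤ v.1)
    ∧ ∀ e ∈ entriesA A c s, ∀ y ∈ L, y.1 = c → e.1 ≤ PySem.Int.toStr y.2

-- A's sort key (int(x[0]), str(x[1])) is the lexicographic key on (Int, String)
lemma sorted2_eq_sorted_lex (xs : List (Int × Int)) :
    PySem.List.sorted2 xs (fun x => x.1) (fun x => PySem.Int.toStr x.2)
      = PySem.List.sorted xs (fun x => toLex (x.1, PySem.Int.toStr x.2)) := by
  have hpred : (fun (a b : Int × Int) =>
        decide (a.1 < b.1) || (!decide (b.1 < a.1) && decide (PySem.Int.toStr a.2 < PySem.Int.toStr b.2)))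
      = (fun (a b : Int × Int) =>
        decide (toLex (a.1, PySem.Int.toStr a.2) < toLex (b.1, PySem.Int.toStr b.2))) := by
    funext a b
    rw [Bool.eq_iff_iff]
    simp only [Bool.or_eq_true, Bool.and_eq_true, Bool.not_eq_true', decide_eq_true_eq,
      decide_eq_false_iff_not, Prod.Lex.lt_iff, ofLex_toLex]
    constructor
    · rintro (h | ⟨h1, h2⟩)
      · exact Or.inl h
      · rcases lt_trichotomy a.1 b.1 with h3 | h3 | h3
        · exact Or.inl h3
        · exact Or.inr ⟨h3, h2⟩
        · exact absurd h3 h1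
    · rintro (h | ⟨h1, h2⟩)
      · exact Or.inl h
      · exact Or.inr ⟨by rw [h1]; exact lt_irrefl _, h2⟩
  rw [PySem.List.sorted_eq_foldl_insertBy]
  simp only [PySem.List.sorted2, Bool.false_eq_true, if_false]
  rw [hpred]

lemma stainGroups_go_getD (pp : List String) (d : PySem.Dict String (List String)) (s : String) :
    (pp.foldl (fun g p =>
      match extractStain p with
      | some s => g.modify s [] (· ++ [p])
      | none => g) d).getD s []
    = d.getD s [] ++ pp.filter (fun p => extractStain p == some s) := by
  induction pp generalizing d with
  | nil => simp
  | cons p pp ih =>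
    simp only [List.foldl_cons, List.filter_cons]
    cases h : extractStain p with
    | none => simp [ih]
    | some t =>
      by_cases hts : t = s
      · subst hts
        simp [ih]
      · simp [ih, PySem.Dict.getD_modify, hts, Ne.symm hts]

lemma stainGroups_getD (pp : List String) (s : String) :
    (stainGroups pp).getD s [] = pp.filter (fun p => extractStain p == some s) := by
  unfold stainGroups
  rw [stainGroups_go_getD]
  simp

lemma stainGroups_go_nodup (pp : List String) (d : PySem.Dict String (List String))
    (hd : d.keys.Nodup) :
    (pp.foldl (fun g p =>
      match extractStain p with
      | some s => g.modify s [] (· ++ [p])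
      | none => g) d).keys.Nodup := by
  induction pp generalizing d with
  | nil => exact hd
  | cons p pp ih =>
    simp only [List.foldl_cons]
    cases h : extractStain p with
    | none => exact ih d hd
    | some t => exact ih _ (PySem.Dict.nodup_keys_insert _ _ _ hd)

lemma stainGroups_keys_nodup (pp : List String) : (stainGroups pp).keys.Nodup := by
  unfold stainGroups
  exact stainGroups_go_nodup pp _ (by simp)

lemma stainGroups_go_mem (pp : List String) (d : PySem.Dict String (List String)) (k : String) :
    (k ∈ (pp.foldl (fun g p =>
      match extractStain p with
      | some s => g.modify s [] (· ++ [p])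
      | none => g) d).keys)
    ↔ (k ∈ d.keys ∨ ∃ p ∈ pp, extractStain p = some k) := by
  induction pp generalizing d with
  | nil => simp
  | cons p pp ih =>
    simp only [List.foldl_cons]
    cases h : extractStain p with
    | none =>
      rw [ih]
      constructor
      · rintro (hk | ⟨q, hq, he⟩)
        · exact Or.inl hk
        · exact Or.inr ⟨q, List.mem_cons_of_mem _ hq, he⟩
      · rintro (hk | ⟨q, hq, he⟩)
        · exact Or.inl hk
        · rcases List.mem_cons.mp hq with hq | hq
          · subst hq; rw [h] at he; cases he
          · exact Or.inr ⟨q, hq, he⟩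
    | some t =>
      rw [ih]
      simp only [PySem.Dict.modify, PySem.Dict.mem_keys_insert]
      constructor
      · rintro (⟨hk | hk⟩ | ⟨q, hq, he⟩)
        · exact Or.inr ⟨p, List.mem_cons.mpr (Or.inl rfl), by rw [h, hk]⟩
        · exact Or.inl hk
        · exact Or.inr ⟨q, List.mem_cons_of_mem _ hq, he⟩
      · rintro (hk | ⟨q, hq, he⟩)
        · exact Or.inl (Or.inr hk)
        · rcases List.mem_cons.mp hq with hq | hq
          · subst hq; rw [h] at he; cases he; exact Or.inl (Or.inl rfl)
          · exact Or.inr ⟨q, hq, he⟩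

lemma mem_stainGroups_keys (pp : List String) (k : String) :
    k ∈ (stainGroups pp).keys ↔ ∃ p ∈ pp, extractStain p = some k := by
  unfold stainGroups
  rw [stainGroups_go_mem]
  simp

-- extract_stain_from_filename only ever returns one of the three fixed stain names
lemma extractStain_mem_STAINS (p : String) (k : String) (h : extractStain p = some k) :
    k ∈ STAINS := by
  simp only [extractStain] at h
  split at h
  · cases h; decide
  · split at h
    · cases h; decide
    · split at h
      · cases h; decide
      · cases h

-- a fold that skips on a Bool guard is a fold over the filtered list
lemma foldl_skip_isEmpty {α β : Type} (p : β → Bool) (f : α → β → α) (L : List β) (a : α) :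
    L.foldl (fun a x => if p x then a else f a x) a = (L.filter (fun x => !p x)).foldl f a := by
  induction L generalizing a with
  | nil => rfl
  | cons x L ih =>
    simp only [List.foldl_cons, List.filter_cons]
    by_cases h : p x = true
    · simp [h, ih]
    · simp only [Bool.not_eq_true] at h
      simp [h, ih]

-- sorting does not change emptiness
lemma sorted_isEmpty (l : List String) :
    (PySem.List.sorted l (fun y => y)).isEmpty = l.isEmpty := by
  have h := (PySem.List.sorted_perm l (fun y => y) false).length_eq
  rw [Bool.eq_iff_iff, List.isEmpty_iff_length_eq_zero, List.isEmpty_iff_length_eq_zero, h]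

lemma STAINS_pairwise_lt : STAINS.Pairwise (· < ·) := by
  simp only [STAINS, List.pairwise_cons, String.lt_iff_toList_lt]
  refine ⟨?_, ?_, ?_⟩ <;> decide

-- B's fixed-order stain traversal is exactly A's sorted stain-group keys
lemma stainKeys_eq (pp : List String) :
    PySem.List.sorted (stainGroups pp).keys (fun k => k)
      = STAINS.filter (fun s => !(pp.filter (fun p => extractStain p == some s)).isEmpty) := by
  apply PySem.List.sorted_id_eq_of_perm_of_pairwise
  · rw [List.perm_ext_iff_of_nodup
      (List.Nodup.filter _ (by decide)) (stainGroups_keys_nodup pp)]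
    intro k
    rw [List.mem_filter, mem_stainGroups_keys]
    constructor
    · rintro ⟨-, hne⟩
      simp only [Bool.not_eq_true', List.isEmpty_eq_false_iff,
        List.isEmpty_eq_false_iff] at hne
      obtain ⟨q, hq⟩ := List.exists_mem_of_ne_nil _ hne
      rw [List.mem_filter] at hq
      exact ⟨q, hq.1, by simpa using hq.2⟩
    · rintro ⟨q, hq, he⟩
      refine ⟨extractStain_mem_STAINS q k he, ?_⟩
      simp only [Bool.not_eq_true', List.isEmpty_eq_false_iff]
      intro hnil
      have : q ∈ pp.filter (fun p => extractStain p == some k) := by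
        rw [List.mem_filter]; exact ⟨hq, by simp [he]⟩
      rw [hnil] at this
      cases this
  · exact List.Pairwise.filter _ (STAINS_pairwise_lt.imp le_of_lt)

-- B's per-slice body rewritten onto A's sorted stain-key traversal
lemma cdStep_eq (patches : List (Int × Int × List String))
    (cd : PySem.Dict Int (PySem.Dict String (List (List String)))) (x : Int × Int) :
    cdStep patches cd x
      = match pyLookup2 patches x.1 x.2 with
        | none => cd
        | some pp =>
          (PySem.List.sorted (stainGroups pp).keys (fun k => k)).foldl
            (fun t stain => t.modify x.1 PySem.Dict.empty
              (fun inner => inner.modify stain []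
                (· ++ [PySem.List.sorted ((stainGroups pp).getD stain []) (fun y => y)]))) cd := by
  simp only [cdStep]
  cases pyLookup2 patches x.1 x.2 with
  | none => rfl
  | some pp =>
    simp only [sorted_isEmpty]
    have hs := foldl_skip_isEmpty
      (fun s => (pp.filter (fun p => extractStain p == some s)).isEmpty)
      (fun cd stain => cd.modify x.1 PySem.Dict.empty
        (fun inner => inner.modify stain []
          (· ++ [PySem.List.sorted (pp.filter (fun p => extractStain p == some stain)) (fun y => y)])))
      STAINS cd
    rw [hs, stainKeys_eq]
    apply PySem.List.foldl_congr_mem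
    intro t stain _
    rw [stainGroups_getD]

-- a nested modify changes exactly the (x, t) entry list, appending e
lemma entries_modify {v : Type} (A : PySem.Dict Int (PySem.Dict String (List v)))
    (x : Int) (t : String) (e : v) (c : Int) (s : String) :
    ((A.modify x PySem.Dict.empty (fun inner => inner.modify t [] (· ++ [e]))).getD c
        PySem.Dict.empty).getD s []
    = if c = x ∧ s = t then (A.getD c PySem.Dict.empty).getD s [] ++ [e]
      else (A.getD c PySem.Dict.empty).getD s [] := by
  rw [PySem.Dict.getD_modify]
  by_cases h1 : c = x
  · subst h1
    rw [if_pos rfl, PySem.Dict.getD_modify]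
    by_cases h2 : s = t
    · subst h2; simp
    · simp [h2]
  · simp [h1]

lemma nodup_keys_modify {k v : Type} [BEq k] [LawfulBEq k] (d : PySem.Dict k v)
    (x : k) (d0 : v) (f : v → v) (h : d.keys.Nodup) : (d.modify x d0 f).keys.Nodup :=
  PySem.Dict.nodup_keys_insert _ _ _ h

lemma keys_modify_congr {k : Type} [BEq k] [LawfulBEq k] [DecidableEq k] {v1 v2 : Type}
    (d1 : PySem.Dict k v1) (d2 : PySem.Dict k v2) (h : d2.keys = d1.keys)
    (x : k) (d01 : v1) (f1 : v1 → v1) (d02 : v2) (f2 : v2 → v2) :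
    (d2.modify x d02 f2).keys = (d1.modify x d01 f1).keys := by
  rw [PySem.Dict.keys_modify, PySem.Dict.keys_modify]
  by_cases hk : d1.contains x = true
  · have hk2 : d2.contains x = true := by
      rw [PySem.Dict.contains_eq_decide_mem_keys] at hk ⊢
      rw [h]; exact hk
    rw [PySem.Dict.keys_insert_of_contains _ _ hk, PySem.Dict.keys_insert_of_contains _ _ hk2, h]
  · have hk' : d1.contains x = false := by revert hk; cases d1.contains x <;> simp
    have hk2 : d2.contains x = false := by
      rw [PySem.Dict.contains_eq_decide_mem_keys] at hk' ⊢
      rw [h]; exact hk'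
    rw [PySem.Dict.keys_insert_of_not_contains _ _ hk',
      PySem.Dict.keys_insert_of_not_contains _ _ hk2, h]

lemma getD_modify_outer_ne {k : Type} [BEq k] [LawfulBEq k] [DecidableEq k] {v : Type}
    (d : PySem.Dict k v) (x c : k) (d0 : v) (f : v → v) (h : c ≠ x) :
    (d.modify x d0 f).getD c d0 = d.getD c d0 := by
  rw [PySem.Dict.getD_modify, if_neg h]

lemma bounded_tail (A : PySem.Dict Int (PySem.Dict String (List (String × List String))))
    (x : Int × Int) (L : List (Int × Int)) (h : Bounded A (x :: L)) : Bounded A L := by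
  intro c s
  exact ⟨(h c s).1, fun e he y hy hyc => (h c s).2 e he y (List.mem_cons_of_mem _ hy) hyc⟩

lemma inner_sim (x : Int × Int) (L : List (Int × Int)) (S : List String) (vA : String → List String)
    (A : PySem.Dict Int (PySem.Dict String (List (String × List String))))
    (B : PySem.Dict Int (PySem.Dict String (List (List String))))
    (hR : SimRel A B) (hb : Bounded A (x :: L))
    (hx : ∀ y ∈ L, y.1 = x.1 → PySem.Int.toStr x.2 ≤ PySem.Int.toStr y.2) :
    SimRel (S.foldl (fun t stain => t.modify x.1 PySem.Dict.empty
          (fun inner => inner.modify stain [] (· ++ [(PySem.Int.toStr x.2, vA stain)]))) A)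
        (S.foldl (fun t stain => t.modify x.1 PySem.Dict.empty
          (fun inner => inner.modify stain [] (· ++ [vA stain]))) B)
    ∧ Bounded (S.foldl (fun t stain => t.modify x.1 PySem.Dict.empty
          (fun inner => inner.modify stain [] (· ++ [(PySem.Int.toStr x.2, vA stain)]))) A) (x :: L) := by
  induction S generalizing A B with
  | nil => exact ⟨hR, hb⟩
  | cons t S ih =>
    simp only [List.foldl_cons]
    obtain ⟨hA, hKeys, hInner, hEntries⟩ := hR
    apply ih
    · -- SimRel after one nested modify
      refine ⟨nodup_keys_modify _ _ _ _ hA, keys_modify_congr _ _ hKeys _ _ _ _ _, ?_, ?_⟩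
      · intro c
        by_cases hc : c = x.1
        · subst hc
          rw [PySem.Dict.getD_modify, if_pos rfl, PySem.Dict.getD_modify, if_pos rfl]
          exact ⟨nodup_keys_modify _ _ _ _ (hInner x.1).1,
            keys_modify_congr _ _ (hInner x.1).2 _ _ _ _ _⟩
        · rw [getD_modify_outer_ne _ _ _ _ _ hc, getD_modify_outer_ne _ _ _ _ _ hc]
          exact hInner c
      · intro c s
        simp only [entriesA, entriesB]
        rw [entries_modify, entries_modify]
        by_cases hcs : c = x.1 ∧ s = t
        · rw [if_pos hcs, if_pos hcs, List.map_append]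
          exact congrArg (· ++ [vA t]) (hEntries c s)
        · rw [if_neg hcs, if_neg hcs]
          exact hEntries c s
    · -- Bounded after one nested modify
      intro c s
      simp only [entriesA]
      rw [entries_modify]
      by_cases hcs : c = x.1 ∧ s = t
      · rw [if_pos hcs]
        obtain ⟨hcx, -⟩ := hcs
        subst hcx
        constructor
        · rw [List.pairwise_append]
          refine ⟨(hb x.1 s).1, by simp, ?_⟩
          intro u hu v hv
          simp only [List.mem_singleton] at hv
          subst hv
          exact (hb x.1 s).2 u hu x (by simp) rfl
        · intro e he y hy hyc
          rcases List.mem_append.mp he with he | he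
          · exact (hb x.1 s).2 e he y hy hyc
          · simp only [List.mem_singleton] at he
            subst he
            rcases List.mem_cons.mp hy with hy | hy
            · subst hy; exact le_refl _
            · exact hx y hy hyc
      · rw [if_neg hcs]
        exact hb c s

lemma fold_sim (patches : List (Int × Int × List String)) (L : List (Int × Int))
    (hpw : L.Pairwise (fun a b => a.1 = b.1 → PySem.Int.toStr a.2 ≤ PySem.Int.toStr b.2))
    (A : PySem.Dict Int (PySem.Dict String (List (String × List String))))
    (B : PySem.Dict Int (PySem.Dict String (List (List String))))
    (hR : SimRel A B) (hb : Bounded A L) :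
    SimRel (L.foldl (aTmpStep patches) A) (L.foldl (cdStep patches) B)
    ∧ Bounded (L.foldl (aTmpStep patches) A) [] := by
  induction L generalizing A B with
  | nil => exact ⟨hR, hb⟩
  | cons x L ih =>
    rw [List.pairwise_cons] at hpw
    obtain ⟨hx, hpw⟩ := hpw
    simp only [List.foldl_cons]
    cases hp : pyLookup2 patches x.1 x.2 with
    | none =>
      apply ih hpw
      · rw [cdStep_eq]
        simp only [aTmpStep, hp]
        exact hR
      · simp only [aTmpStep, hp]
        exact bounded_tail _ _ _ hb
    | some pp =>
      have h1 := inner_sim x L (PySem.List.sorted (stainGroups pp).keys (fun k => k))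
        (fun stain => PySem.List.sorted ((stainGroups pp).getD stain []) (fun y => y)) A B
        hR hb (fun y hy h => hx y hy h.symm)
      apply ih hpw
      · rw [cdStep_eq]
        simp only [aTmpStep, hp]
        exact h1.1
      · simp only [aTmpStep, hp]
        exact bounded_tail _ x _ h1.2

-- ===== VERDICT (by name: the statement is the Claim_ definition above) =====
theorem build_case_dict_spec : Claim_equal_build_case_dict := by
  intro slice_list patches slice_to_class _
  unfold Spec_build_case_dict
  have hpw : (PySem.List.sorted2 slice_list (fun x => x.1) (fun x => PySem.Int.toStr x.2)).Pairwise
      (fun a b => a.1 = b.1 → PySem.Int.toStr a.2 ≤ PySem.Int.toStr b.2) := by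
    rw [sorted2_eq_sorted_lex]
    refine (PySem.List.sorted_pairwise _ _).imp ?_
    intro a b h hab
    rcases Prod.Lex.le_iff.mp h with h1 | ⟨-, h2⟩
    · simp only [ofLex_toLex] at h1
      exact absurd h1 (by rw [hab]; exact lt_irrefl _)
    · simpa using h2
  have h0 : SimRel PySem.Dict.empty PySem.Dict.empty :=
    ⟨by simp, by simp, fun c => ⟨by simp, by simp⟩, fun c s => by simp [entriesA, entriesB]⟩
  have hbound0 : Bounded PySem.Dict.empty
      (PySem.List.sorted2 slice_list (fun x => x.1) (fun x => PySem.Int.toStr x.2)) := by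
    intro c s
    simp [entriesA]
  obtain ⟨hR, hb⟩ := fold_sim patches _ hpw PySem.Dict.empty PySem.Dict.empty h0 hbound0
  obtain ⟨hA, hKeys, hInner, hEntries⟩ := hR
  simp only [Bounded, entriesA] at hb
  simp only [build_case_dict, build_case_dict_alt]
  apply Prod.ext
  · -- first components: case dicts agree
    dsimp only
    rw [foldl_aStep_fst]
    have hBnodup : ((PySem.List.sorted2 slice_list (fun x => x.1) (fun x => PySem.Int.toStr x.2)).foldl
        (cdStep patches) PySem.Dict.empty).keys.Nodup := by
      rw [hKeys]; exact hA
    rw [PySem.Dict.items_eq_map_keys _ hA PySem.Dict.empty,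
      PySem.Dict.items_eq_map_keys _ hBnodup PySem.Dict.empty, hKeys,
      List.map_map, List.map_map]
    apply List.map_congr_left
    intro c _
    simp only [Function.comp_apply]
    congr 1
    have hInrB : (((PySem.List.sorted2 slice_list (fun x => x.1) (fun x => PySem.Int.toStr x.2)).foldl
        (cdStep patches) PySem.Dict.empty).getD c PySem.Dict.empty).keys.Nodup := by
      rw [(hInner c).2]; exact (hInner c).1
    rw [PySem.Dict.items_eq_map_keys _ (hInner c).1 ([] : List (String × List String)),
      PySem.Dict.items_eq_map_keys _ hInrB ([] : List (List String)), (hInner c).2,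
      List.map_map]
    apply List.map_congr_left
    intro s _
    simp only [Function.comp_apply]
    congr 1
    rw [PySem.List.sorted_eq_self_of_pairwise _ (fun t : String × List String => t.1) ((hb c s).1)]
    exact (hEntries c s).symm
  · -- second components: the label maps agree
    dsimp only
    rw [foldl_aStep_snd]
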